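-- pv_equiv track=rewrite | github.com/MohammadIng/NamedEntityRecognition | src/data_processing_flair.py | parse_annotated_text
-- ===== SOURCE A (Python) =====
-- def parse_annotated_text(input_text):
--     """
--     Parse annotated text (with <TAG>...</TAG>) into CoNLL format using BIO tagging.
--     Args:
--         input_text (str): The input text with annotations.
--     Returns:
--         list: A list of (word, tag) tuples in CoNLL format.
--     """
--     sentences = []
--     current_sentence = []
--     current_tag = None  # Stores the current tag, e.g., "LOC", "EVENT"
--     inside_tag = False  # Tracks if we are inside a tag
--
--     word_buffer = []  # Temporary buffer for the current word
--
--     i = 0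
--     while i < len(input_text):
--         char = input_text[i]
--
--         if char == "<":  # Start of a tag
--             # Find the closing '>'
--             closing_index = input_text.find(">", i)
--             tag_content = input_text[i + 1: closing_index]
--
--             if tag_content.startswith("/"):  # Closing tag
--                 if word_buffer:
--                     word = "".join(word_buffer).strip()
--                     if word:
--                         if inside_tag:
--                             current_sentence.append((word, f"I-{current_tag}"))
--                         else:
--                             current_sentence.append((word, "O"))
--                     word_buffer = []
--                 inside_tag = False  # End the current tag
--                 current_tag = None
--             else:  # Opening tag
--                 current_tag = tag_content  # Set the current tag
--                 inside_tag = True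
--             i = closing_index  # Move index to the end of the tag
--         elif char in {" ", "\n", ".", "!", "?"}:  # Word boundary or sentence end
--             if word_buffer:
--                 word = "".join(word_buffer).strip()
--                 if word:
--                     if inside_tag:
--                         # Use `B-` if it’s the first word in the tag, otherwise `I-`
--                         tag = f"B-{current_tag}" if not any(
--                             w[1].startswith("B-") for w in current_sentence) else f"I-{current_tag}"
--                         current_sentence.append((word, tag))
--                     else:
--                         current_sentence.append((word, "O"))
--                 word_buffer = []  # Clear buffer
--
--             if char in {".", "!", "?"}:  # Sentence end
--                 current_sentence.append((char, "O"))
--                 sentences.append(current_sentence)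
--                 current_sentence = []
--         else:  # Part of a word
--             word_buffer.append(char)
--
--         i += 1
--
--     # Add any remaining word
--     if word_buffer:
--         word = "".join(word_buffer).strip()
--         if inside_tag:
--             tag = f"B-{current_tag}" if not any(
--                 w[1].startswith("B-") for w in current_sentence) else f"I-{current_tag}"
--             current_sentence.append((word, tag))
--         else:
--             current_sentence.append((word, "O"))
--     if current_sentence:
--         sentences.append(current_sentence)
--
--     return sentences
-- ===== SOURCE B (Python) =====
-- import re
--
-- # Staged pipeline instead of A's single char-scan: a regex token pass, an event
-- # pass that only decides word kinds (O / inside-close / inside-boundary / end /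
-- # trailing), and a final labelling pass that assigns B-/I- per sentence with a
-- # has_b flag instead of A's any() re-scan. Same return value on inputs where
-- # every '<' has a later '>' (elsewhere A never returns).
-- _TOK = re.compile(r'<[^>]*>?|[ \n.!?]')
--
--
-- def _events(text):
--     """First two stages: tokenize, then emit (kind, word, tag) events."""
--     evs = []
--     tag = None
--     inside = False
--     pend = ''
--     pos = 0
--     for m in _TOK.finditer(text):
--         if m.start() > pos:
--             pend += text[pos:m.start()]
--         pos = m.end()
--         tok = m.group()
--         if tok[0] == '<':
--             content = tok[1:-1] if tok.endswith('>') else tok[1:]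
--             if content.startswith('/'):
--                 if pend:
--                     w = pend.strip()
--                     if w:
--                         evs.append(('I', w, tag) if inside else ('O', w, None))
--                     pend = ''
--                 inside = False
--             else:
--                 tag = content
--                 inside = True
--         else:
--             if pend:
--                 w = pend.strip()
--                 if w:
--                     evs.append(('B?', w, tag) if inside else ('O', w, None))
--                 pend = ''
--             if tok != ' ' and tok != '\n':
--                 evs.append(('END', tok, None))
--     if pos < len(text):
--         pend += text[pos:]
--     if pend:
--         evs.append(('FIN', pend.strip(), tag if inside else None))
--     return evs
--
--
-- def parse_annotated_text(input_text):
--     sentences = []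
--     cur = []
--     has_b = False
--     for kind, w, tag in _events(input_text):
--         if kind == 'O':
--             cur.append((w, 'O'))
--         elif kind == 'I':
--             cur.append((w, 'I-' + tag))
--         elif kind == 'B?':
--             cur.append((w, ('I-' if has_b else 'B-') + tag))
--             has_b = True
--         elif kind == 'END':
--             cur.append((w, 'O'))
--             sentences.append(cur)
--             cur = []
--             has_b = False
--         else:  # FIN (trailing word, no empty-word guard, mirrors A's tail flush)
--             if tag is not None:
--                 cur.append((w, ('I-' if has_b else 'B-') + tag))
--             else:
--                 cur.append((w, 'O'))
--     if cur:
--         sentences.append(cur)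
--     return sentences
-- ===== Notes on version B (the rewrite author's own statement) =====
-- stated objective: faster
-- what changed: B is a staged pipeline — a regex token pass, an event pass that only classifies each word (O / closing-tag I / boundary word / sentence end / trailing), and a final labelling pass that assigns B-/I- per sentence with a has-B flag — replacing A's single character-by-character scan whose any() re-scans the current sentence at every word flush.
-- outside the precondition, e.g. on parse_annotated_text('<'): A does not finish within the time limit, B returns []
import Mathlib
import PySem

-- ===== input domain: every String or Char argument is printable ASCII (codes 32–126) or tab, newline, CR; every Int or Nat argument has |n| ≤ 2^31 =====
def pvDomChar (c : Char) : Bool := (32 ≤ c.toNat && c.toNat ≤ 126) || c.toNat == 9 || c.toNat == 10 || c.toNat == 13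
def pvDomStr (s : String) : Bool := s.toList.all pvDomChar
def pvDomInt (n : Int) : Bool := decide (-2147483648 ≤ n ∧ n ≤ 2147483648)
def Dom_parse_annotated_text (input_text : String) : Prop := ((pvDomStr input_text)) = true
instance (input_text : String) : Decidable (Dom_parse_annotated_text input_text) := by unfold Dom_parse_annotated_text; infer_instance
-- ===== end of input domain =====

-- B replaces A's single character scan by a staged pipeline — regex-style tokenizer, an event pass
-- deciding word kinds, and a labelling pass with a has-B flag instead of A's any() re-scan; same
-- return value wherever A returns.

-- ===== PORT A =====
-- str(current_tag) as used by the f-strings (None prints "None"; never reached when inside)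
def pvOptTagStr (o : Option String) : String := o.getD "None"

-- "".join(word_buffer).strip()
def pvStripJoin (wb : List Char) : String := PySem.Str.strip (String.ofList wb)

-- f"B-{tag}" if not any(w[1].startswith("B-") for w in current_sentence) else f"I-{tag}"
def pvFlushTagA (cur : List (String × String)) (ctag : Option String) : String :=
  if (cur.any fun w => PySem.Str.startswith w.2 "B-") = false then "B-" ++ pvOptTagStr ctag
  else "I-" ++ pvOptTagStr ctag

-- the closing-tag flush block of A (returns new current_sentence and word_buffer)
def pvFlushCloseA (cur : List (String × String)) (ctag : Option String) (inside : Bool)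
    (wb : List Char) : List (String × String) × List Char :=
  if wb ≠ [] then
    let word := pvStripJoin wb
    (if word ≠ "" then
       (if inside then cur ++ [(word, "I-" ++ pvOptTagStr ctag)] else cur ++ [(word, "O")])
     else cur, [])
  else (cur, wb)

-- the word-boundary flush block of A
def pvFlushBoundA (cur : List (String × String)) (ctag : Option String) (inside : Bool)
    (wb : List Char) : List (String × String) × List Char :=
  if wb ≠ [] then
    let word := pvStripJoin wb
    (if word ≠ "" then
       (if inside then cur ++ [(word, pvFlushTagA cur ctag)] else cur ++ [(word, "O")])
     else cur, [])
  else (cur, wb)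

-- the code after A's while loop (trailing flush, no empty-word guard)
def pvFinishA (wb : List Char) (cur : List (String × String))
    (sents : List (List (String × String))) (ctag : Option String) (inside : Bool) :
    List (List (String × String)) :=
  let cur' := if wb ≠ [] then
      let word := pvStripJoin wb
      if inside then cur ++ [(word, pvFlushTagA cur ctag)] else cur ++ [(word, "O")]
    else cur
  if cur' ≠ [] then sents ++ [cur'] else sents

-- A's while loop; fuel = len(input); inside Pre_ the index i strictly increases each pass, so the
-- fuel is never exhausted before i ≥ len (outside Pre_ the Python loops forever and nothing is claimed)
def pvLoopA (l : List Char) : Nat → Nat → List Char → List (String × String) →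
    List (List (String × String)) → Option String → Bool → List (List (String × String))
  | 0, _, wb, cur, sents, ctag, inside => pvFinishA wb cur sents ctag inside
  | fuel+1, i, wb, cur, sents, ctag, inside =>
    match l[i]? with
    | none => pvFinishA wb cur sents ctag inside
    | some c =>
      if c = '<' then
        let ci := PySem.Chars.findFrom l ['>'] (i : Int)
        let content := PySem.List.slice l (some ((i : Int) + 1)) (some ci)
        if PySem.Chars.startswith content ['/'] then
          let p := pvFlushCloseA cur ctag inside wb
          pvLoopA l fuel (ci + 1).toNat p.2 p.1 sents none false
        else
          pvLoopA l fuel (ci + 1).toNat wb cur sents (some (String.ofList content)) true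
      else if c = ' ' ∨ c = '\n' ∨ c = '.' ∨ c = '!' ∨ c = '?' then
        let p := pvFlushBoundA cur ctag inside wb
        if c = '.' ∨ c = '!' ∨ c = '?' then
          pvLoopA l fuel (i+1) p.2 [] (sents ++ [p.1 ++ [(String.ofList [c], "O")]]) ctag inside
        else
          pvLoopA l fuel (i+1) p.2 p.1 sents ctag inside
      else
        pvLoopA l fuel (i+1) (wb ++ [c]) cur sents ctag inside

def parse_annotated_text (input_text : String) : List (List (String × String)) :=
  pvLoopA input_text.toList input_text.toList.length 0 [] [] [] none false

-- ===== PORT B =====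
-- stage 1: the regex pass of Source B, r'<[^>]*>?|[ \n.!?]' plus the gaps as word pieces
inductive PvTok where
  | ptag : String → PvTok       -- '<...>' (content, '/' kept for closing tags)
  | pbound : Char → PvTok       -- one of ' ' '\n' '.' '!' '?'
  | ppiece : String → PvTok     -- maximal run of other characters
deriving DecidableEq, Repr

def pvIsBound (c : Char) : Bool := c = ' ' || c = '\n' || c = '.' || c = '!' || c = '?'
def pvIsWord (c : Char) : Bool := !pvIsBound c && !(c = '<')

def pvTokenize : List Char → List PvTok
  | [] => []
  | c :: rest =>
    if c = '<' then
      PvTok.ptag (String.ofList (rest.takeWhile (fun d => d != '>'))) ::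
        pvTokenize ((rest.dropWhile (fun d => d != '>')).drop 1)
    else if pvIsBound c then
      PvTok.pbound c :: pvTokenize rest
    else
      PvTok.ppiece (String.ofList (c :: rest.takeWhile pvIsWord)) ::
        pvTokenize (rest.dropWhile pvIsWord)
termination_by l => l.length
decreasing_by
  · have h1 := List.length_dropWhile_le (fun d => d != '>') rest
    simp only [List.length_cons, List.length_drop]
    omega
  · simp
  · have h1 := List.length_dropWhile_le pvIsWord rest
    simp only [List.length_cons]
    omega

-- stage 2: events — word kinds are decided here, the B-/I- choice is NOT
inductive PvEv where
  | evO : String → PvEv                     -- word outside any tag → label O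
  | evI : String → String → PvEv            -- word consumed by a closing tag → always I-
  | evB : String → String → PvEv            -- word at a boundary inside a tag → B- or I- per sentence
  | evEnd : Char → PvEv                     -- '.' '!' '?' sentence end
  | evFin : String → Bool → String → PvEv   -- trailing word (no empty guard), inside flag, tag
deriving DecidableEq, Repr

-- the `if pend: w = pend.strip(); if w: evs.append(...)` block of _events
def pvFlushEvs (inside : Bool) (tag pend : String) (close : Bool) : List PvEv :=
  if pend ≠ "" then
    let w := PySem.Str.strip pend
    if w ≠ "" then
      [if inside then (if close then PvEv.evI w tag else PvEv.evB w tag) else PvEv.evO w]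
    else []
  else []

def pvEvents : List PvTok → String → Bool → String → List PvEv
  | [], tag, inside, pend =>
      if pend ≠ "" then [PvEv.evFin (PySem.Str.strip pend) inside tag] else []
  | PvTok.ptag content :: ts, tag, inside, pend =>
      if PySem.Str.startswith content "/" then
        pvFlushEvs inside tag pend true ++ pvEvents ts tag false ""
      else
        pvEvents ts content true pend
  | PvTok.pbound c :: ts, tag, inside, pend =>
      pvFlushEvs inside tag pend false ++
        (if c = '.' ∨ c = '!' ∨ c = '?' then PvEv.evEnd c :: pvEvents ts tag inside ""
         else pvEvents ts tag inside "")
  | PvTok.ppiece s :: ts, tag, inside, pend => pvEvents ts tag inside (pend ++ s)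

-- stage 3: the labelling pass of Source B (has_b flag per sentence)
def pvLabel : List PvEv → List (List (String × String)) → List (String × String) → Bool →
    List (List (String × String))
  | [], sents, cur, _ => if cur ≠ [] then sents ++ [cur] else sents
  | PvEv.evO w :: es, sents, cur, hb => pvLabel es sents (cur ++ [(w, "O")]) hb
  | PvEv.evI w t :: es, sents, cur, hb => pvLabel es sents (cur ++ [(w, "I-" ++ t)]) hb
  | PvEv.evB w t :: es, sents, cur, hb =>
      pvLabel es sents (cur ++ [(w, (if hb then "I-" else "B-") ++ t)]) true
  | PvEv.evEnd c :: es, sents, cur, _ =>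
      pvLabel es (sents ++ [cur ++ [(String.ofList [c], "O")]]) [] false
  | PvEv.evFin w inside t :: es, sents, cur, hb =>
      if inside then pvLabel es sents (cur ++ [(w, (if hb then "I-" else "B-") ++ t)]) hb
      else pvLabel es sents (cur ++ [(w, "O")]) hb

def parse_annotated_text_alt (input_text : String) : List (List (String × String)) :=
  pvLabel (pvEvents (pvTokenize input_text.toList) "" false "") [] [] false

-- ===== PRECONDITION & SPEC =====
-- Pre_ excludes inputs containing a '<' with no '>' after it: there Python A's find returns -1,
-- the scan index resets to 0 and A loops forever, never returning a value.
def Pre_parse_annotated_text (input_text : String) : Prop :=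
  ∀ i < input_text.toList.length,
    input_text.toList[i]? = some '<' → '>' ∈ input_text.toList.drop i
instance (input_text : String) : Decidable (Pre_parse_annotated_text input_text) := by
  unfold Pre_parse_annotated_text; infer_instance

def pvWitness_parse_annotated_text : String := "Hi <LOC>New York</LOC>. Bye!"

def Spec_parse_annotated_text (input_text : String) (out : List (List (String × String))) : Prop :=
  out = parse_annotated_text_alt input_text
instance (input_text : String) (out : List (List (String × String))) :
    Decidable (Spec_parse_annotated_text input_text out) := by
  unfold Spec_parse_annotated_text; infer_instance

-- ===== CLAIM (what is proved, stated in full; the proofs are below) =====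
def Claim_equal_parse_annotated_text : Prop :=
  ∀ (input_text : String), Dom_parse_annotated_text input_text →
    Pre_parse_annotated_text input_text →
    Spec_parse_annotated_text input_text (parse_annotated_text input_text)

-- ===== LEMMAS AND PROOFS =====
lemma pv_ofList_append (a b : List Char) :
    String.ofList a ++ String.ofList b = String.ofList (a ++ b) := by
  rw [← String.toList_inj]; simp

lemma pv_empty_iff (p : String) : p = "" ↔ p.toList = [] := by
  rw [← String.toList_inj]; simp

lemma pv_strip_eq (p : String) (wb : List Char) (h : p.toList = wb) :
    PySem.Str.strip p = pvStripJoin wb := by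
  show String.ofList (PySem.Chars.strip p.toList) = _
  unfold pvStripJoin
  show _ = String.ofList (PySem.Chars.strip (String.ofList wb).toList)
  simp [h]

-- "B-"/"I-"/"O" labels vs startswith "B-", at the List Char level (simp unfolds Str.startswith there)
lemma pv_swc_B (t : List Char) : PySem.Chars.startswith ('B' :: '-' :: t) ['B', '-'] = true := by
  simp [PySem.Chars.startswith, List.isPrefixOf]

lemma pv_swc_I (t : List Char) : PySem.Chars.startswith ('I' :: '-' :: t) ['B', '-'] = false := by
  simp [PySem.Chars.startswith, List.isPrefixOf]

lemma pv_swc_O : PySem.Chars.startswith ['O'] ['B', '-'] = false := by decide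

-- consuming the closing-tag flush events equals A's closing flush block (and preserves the flag)
lemma pv_label_close (es : List PvEv) (sents : List (List (String × String)))
    (cur : List (String × String)) (ctag : Option String) (tag : String) (inside : Bool)
    (wb : List Char) (pend : String) (hb : Bool)
    (h1 : pend.toList = wb) (h2 : inside = true → ctag = some tag)
    (h3 : hb = cur.any (fun w => PySem.Str.startswith w.2 "B-")) :
    pvLabel (pvFlushEvs inside tag pend true ++ es) sents cur hb
      = pvLabel es sents (pvFlushCloseA cur ctag inside wb).1 hb
    ∧ (pvFlushCloseA cur ctag inside wb).2 = []
    ∧ hb = ((pvFlushCloseA cur ctag inside wb).1).any (fun w => PySem.Str.startswith w.2 "B-") := by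
  have h3' : hb = cur.any (fun w => PySem.Chars.startswith w.2.toList ['B', '-']) := by
    simpa [PySem.Str.startswith] using h3
  unfold pvFlushEvs pvFlushCloseA
  have hwb : wb = [] ↔ pend = "" := by rw [pv_empty_iff, h1]
  by_cases hp : pend = ""
  · have hw : wb = [] := hwb.mpr hp
    simp [hp, hw, h3]
  · have hw : ¬ wb = [] := fun h => hp (hwb.mp h)
    rw [pv_strip_eq pend wb h1] at *
    by_cases hword : pvStripJoin wb = ""
    · simp [hp, hw, hword, h3]
    · cases inside with
      | false =>
        refine ⟨?_, ?_, ?_⟩ <;>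
          simp [hp, hw, hword, pvLabel, List.any_append, PySem.Str.startswith, pv_swc_O, ← h3']
      | true =>
        rw [h2 rfl]
        refine ⟨?_, ?_, ?_⟩ <;>
          simp [hp, hw, hword, pvLabel, List.any_append, PySem.Str.startswith, pv_swc_I,
            pvOptTagStr, ← h3']

-- consuming the boundary flush events equals A's boundary flush block, with the updated flag
lemma pv_label_bound (es : List PvEv) (sents : List (List (String × String)))
    (cur : List (String × String)) (ctag : Option String) (tag : String) (inside : Bool)
    (wb : List Char) (pend : String) (hb : Bool)
    (h1 : pend.toList = wb) (h2 : inside = true → ctag = some tag)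
    (h3 : hb = cur.any (fun w => PySem.Str.startswith w.2 "B-")) :
    pvLabel (pvFlushEvs inside tag pend false ++ es) sents cur hb
      = pvLabel es sents (pvFlushBoundA cur ctag inside wb).1
          (((pvFlushBoundA cur ctag inside wb).1).any (fun w => PySem.Str.startswith w.2 "B-"))
    ∧ (pvFlushBoundA cur ctag inside wb).2 = [] := by
  have h3' : hb = cur.any (fun w => PySem.Chars.startswith w.2.toList ['B', '-']) := by
    simpa [PySem.Str.startswith] using h3
  unfold pvFlushEvs pvFlushBoundA pvFlushTagA
  have hwb : wb = [] ↔ pend = "" := by rw [pv_empty_iff, h1]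
  by_cases hp : pend = ""
  · have hw : wb = [] := hwb.mpr hp
    simp [hp, hw, h3]
  · have hw : ¬ wb = [] := fun h => hp (hwb.mp h)
    rw [pv_strip_eq pend wb h1] at *
    by_cases hword : pvStripJoin wb = ""
    · simp [hp, hw, hword, h3]
    · cases inside with
      | false =>
        refine ⟨?_, ?_⟩ <;>
          simp [hp, hw, hword, pvLabel, List.any_append, PySem.Str.startswith, pv_swc_O, ← h3']
      | true =>
        rw [h2 rfl]
        cases hb with
        | false =>
          refine ⟨?_, ?_⟩ <;>
            simp [hp, hw, hword, pvLabel, List.any_append, PySem.Str.startswith, pv_swc_B,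
              pvOptTagStr, ← h3']
        | true =>
          refine ⟨?_, ?_⟩ <;>
            simp [hp, hw, hword, pvLabel, List.any_append, PySem.Str.startswith, pv_swc_I,
              pvOptTagStr, ← h3']

-- the end of the event stream equals A's code after the loop
lemma pv_label_fin (sents : List (List (String × String))) (cur : List (String × String))
    (ctag : Option String) (tag : String) (inside : Bool) (wb : List Char) (pend : String)
    (hb : Bool)
    (h1 : pend.toList = wb) (h2 : inside = true → ctag = some tag)
    (h3 : hb = cur.any (fun w => PySem.Str.startswith w.2 "B-")) :
    pvLabel (pvEvents [] tag inside pend) sents cur hb = pvFinishA wb cur sents ctag inside := by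
  unfold pvEvents pvFinishA pvFlushTagA
  have hwb : wb = [] ↔ pend = "" := by rw [pv_empty_iff, h1]
  by_cases hp : pend = ""
  · have hw : wb = [] := hwb.mpr hp
    simp [hp, hw, pvLabel]
  · have hw : ¬ wb = [] := fun h => hp (hwb.mp h)
    rw [pv_strip_eq pend wb h1]
    simp only [hp, hw, ne_eq, not_false_iff, if_true, pvLabel]
    cases inside with
    | false => simp
    | true =>
      rw [h2 rfl, ← h3]
      cases hb <;> simp [pvOptTagStr]

lemma pv_takeWhile_first (r : List Char) (d : Nat) (hd : r[d]? = some '>')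
    (hmin : ∀ m, m < d → r[m]? ≠ some '>') :
    r.takeWhile (fun x => x != '>') = r.take d ∧ r.dropWhile (fun x => x != '>') = r.drop d := by
  induction r generalizing d with
  | nil => simp at hd
  | cons a r ih =>
    cases d with
    | zero =>
      simp only [List.getElem?_cons_zero, Option.some_inj] at hd
      subst hd
      simp
    | succ m =>
      have ha : ¬ a = '>' := by
        have := hmin 0 (Nat.succ_pos m); simpa using this
      have hrec := ih m (by simpa using hd)
        (fun k hk => by have := hmin (k+1) (by omega); simpa using this)
      simp [ha, hrec.1, hrec.2]

-- a word character is absorbed into the pending word of the event pass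
lemma pv_absorb (c : Char) (hc : pvIsWord c = true) (rest : List Char)
    (tag : String) (inside : Bool) (pend : String) :
    pvEvents (pvTokenize (c :: rest)) tag inside pend
      = pvEvents (pvTokenize rest) tag inside (pend ++ String.ofList [c]) := by
  have hcl : ¬ c = '<' := by
    intro h; subst h; simp [pvIsWord, pvIsBound] at hc
  have hcb : pvIsBound c = false := by
    unfold pvIsWord at hc
    cases h : pvIsBound c with
    | false => rfl
    | true => rw [h] at hc; simp at hc
  rw [pvTokenize]
  rw [if_neg hcl, if_neg (by simp [hcb])]
  rw [pvEvents]
  cases rest with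
  | nil => simp [pvTokenize]
  | cons d rest' =>
    by_cases hd : pvIsWord d = true
    · have hdl : ¬ d = '<' := by
        intro h; subst h; simp [pvIsWord, pvIsBound] at hd
      have hdb : pvIsBound d = false := by
        unfold pvIsWord at hd
        cases h : pvIsBound d with
        | false => rfl
        | true => rw [h] at hd; simp at hd
      conv_rhs => rw [pvTokenize]
      rw [if_neg hdl, if_neg (by simp [hdb])]
      rw [pvEvents]
      rw [List.takeWhile_cons_of_pos hd, List.dropWhile_cons_of_pos hd]
      congr 1
      rw [String.append_assoc, pv_ofList_append, List.singleton_append]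
    · rw [List.takeWhile_cons_of_neg (by simp [hd]), List.dropWhile_cons_of_neg (by simp [hd])]

lemma pv_main (l : List Char)
    (hpre : ∀ i, l[i]? = some '<' → '>' ∈ l.drop i) :
    ∀ (fuel i : Nat) (wb : List Char) (cur : List (String × String))
      (sents : List (List (String × String))) (ctag : Option String) (inside hb : Bool)
      (tag : String) (pend : String),
      l.length - i ≤ fuel →
      pend.toList = wb →
      (inside = true → ctag = some tag) →
      hb = cur.any (fun w => PySem.Str.startswith w.2 "B-") →
      pvLoopA l fuel i wb cur sents ctag inside
        = pvLabel (pvEvents (pvTokenize (l.drop i)) tag inside pend) sents cur hb := by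
  intro fuel
  induction fuel with
  | zero =>
    intro i wb cur sents ctag inside hb tag pend hf h1 h2 h3
    have hle : l.length ≤ i := by omega
    rw [pvLoopA, List.drop_eq_nil_of_le hle, pvTokenize]
    exact (pv_label_fin sents cur ctag tag inside wb pend hb h1 h2 h3).symm
  | succ fuel ih =>
    intro i wb cur sents ctag inside hb tag pend hf h1 h2 h3
    cases hci : l[i]? with
    | none =>
      have hle : l.length ≤ i := by
        by_contra hx
        push_neg at hx
        rw [List.getElem?_eq_getElem hx] at hci
        cases hci
      simp only [pvLoopA, hci]
      rw [List.drop_eq_nil_of_le hle, pvTokenize]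
      exact (pv_label_fin sents cur ctag tag inside wb pend hb h1 h2 h3).symm
    | some c =>
      have hi : i < l.length := by
        by_contra hx
        push_neg at hx
        rw [List.getElem?_eq_none hx] at hci
        cases hci
      have hgi : l[i] = c := by
        rw [List.getElem?_eq_getElem hi] at hci
        exact Option.some_inj.mp hci
      have hdrop : l.drop i = c :: l.drop (i+1) := by
        rw [List.drop_eq_getElem_cons hi, hgi]
      simp only [pvLoopA, hci]
      by_cases hc : c = '<'
      · subst hc
        rw [if_pos rfl]
        have hmem : '>' ∈ l.drop i := hpre i hci
        have hile : i ≤ l.length := le_of_lt hi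
        have hinf : ['>'] <:+: l.drop i := by
          obtain ⟨s1, t1, ht⟩ := List.append_of_mem hmem
          exact ⟨s1, t1, by rw [ht]; simp⟩
        have hne : PySem.Chars.findFrom l ['>'] (i:Int) ≠ -1 := by
          intro hEq
          rw [PySem.Chars.findFrom_natCast_eq_neg_one_iff l ['>'] i hile] at hEq
          exact hEq hinf
        obtain ⟨hge, hpref, hmin⟩ := PySem.Chars.findFrom_natCast_spec l ['>'] i hile hne
        have hf0 : (0:Int) ≤ PySem.Chars.findFrom l ['>'] (i:Int) :=
          le_trans (Int.natCast_nonneg i) hge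
        obtain ⟨j, hfj⟩ : ∃ j : Nat, PySem.Chars.findFrom l ['>'] (i:Int) = (j:Int) :=
          ⟨_, (Int.toNat_of_nonneg hf0).symm⟩
        rw [hfj] at hge hpref hmin ⊢
        simp only [Int.toNat_natCast] at hpref hmin
        have hjge : i ≤ j := by exact_mod_cast hge
        obtain ⟨t2, ht2⟩ := hpref
        have hjget : l[j]? = some '>' := by
          have hh : (l.drop j).head? = some '>' := by rw [← ht2]; rfl
          rwa [List.head?_drop] at hh
        have hij : i < j := by
          rcases Nat.lt_or_ge i j with hx | hx
          · exact hx
          · have hxeq : i = j := le_antisymm hjge hx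
            rw [← hxeq, hci] at hjget
            simp at hjget
        have hrd : (l.drop (i+1))[j - (i+1)]? = some '>' := by
          rw [List.getElem?_drop, show i + 1 + (j - (i+1)) = j from by omega]
          exact hjget
        have hrmin : ∀ m, m < j - (i+1) → (l.drop (i+1))[m]? ≠ some '>' := by
          intro m hm heq
          rw [List.getElem?_drop] at heq
          obtain ⟨hlt2, hget2⟩ := List.getElem?_eq_some_iff.mp heq
          refine hmin (i+1+m) (by omega) (by omega) ?_
          exact ⟨l.drop (i+1+m+1), by rw [List.drop_eq_getElem_cons hlt2, hget2]; rfl⟩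
        obtain ⟨htw, hdw⟩ := pv_takeWhile_first (l.drop (i+1)) (j - (i+1)) hrd hrmin
        have hcontent : PySem.List.slice l (some ((i:Int)+1)) (some ((j:Nat):Int))
            = (l.drop (i+1)).take (j-(i+1)) := by
          rw [show ((i:Int)+1) = ((i+1:Nat):Int) from by push_cast; ring]
          rw [PySem.List.slice_natCast]
        have hdropnext : ((l.drop (i+1)).dropWhile (fun x => x != '>')).drop 1
            = l.drop (j+1) := by
          rw [hdw, List.drop_drop, List.drop_drop]
          congr 1
          omega
        have htok : pvTokenize (l.drop i)
            = PvTok.ptag (String.ofList ((l.drop (i+1)).take (j-(i+1)))) ::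
                pvTokenize (l.drop (j+1)) := by
          rw [hdrop, pvTokenize, if_pos rfl, htw, hdropnext]
        rw [htok, pvEvents, hcontent]
        have hsw : PySem.Str.startswith (String.ofList ((l.drop (i+1)).take (j-(i+1)))) "/"
            = PySem.Chars.startswith ((l.drop (i+1)).take (j-(i+1))) ['/'] := by
          simp [PySem.Str.startswith]
        rw [hsw]
        have hnext : (((j:Nat):Int) + 1).toNat = j + 1 := by omega
        by_cases hcl : PySem.Chars.startswith ((l.drop (i+1)).take (j-(i+1))) ['/'] = true
        · rw [if_pos hcl, if_pos hcl, hnext]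
          obtain ⟨heq, hwb', hany'⟩ :=
            pv_label_close (pvEvents (pvTokenize (l.drop (j+1))) tag false "")
              sents cur ctag tag inside wb pend hb h1 h2 h3
          rw [heq]
          rw [ih (j+1) _ _ _ none false hb tag "" (by omega) (by rw [hwb']; rfl)
            (by intro h; cases h) hany']
        · rw [if_neg hcl, if_neg hcl, hnext]
          exact ih (j+1) wb cur sents _ true hb
            (String.ofList ((l.drop (i+1)).take (j-(i+1)))) pend (by omega) h1
            (fun _ => rfl) h3
      · rw [if_neg hc]
        by_cases hb2 : c = ' ' ∨ c = '\n' ∨ c = '.' ∨ c = '!' ∨ c = '?'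
        · rw [if_pos hb2]
          have hcb : pvIsBound c = true := by
            rcases hb2 with h|h|h|h|h <;> simp [pvIsBound, h]
          rw [hdrop, pvTokenize, if_neg hc, if_pos hcb, pvEvents]
          obtain ⟨heq, hwb'⟩ :=
            pv_label_bound
              (if c = '.' ∨ c = '!' ∨ c = '?'
                then PvEv.evEnd c :: pvEvents (pvTokenize (l.drop (i+1))) tag inside ""
                else pvEvents (pvTokenize (l.drop (i+1))) tag inside "")
              sents cur ctag tag inside wb pend hb h1 h2 h3
          rw [heq]
          by_cases hse : c = '.' ∨ c = '!' ∨ c = '?'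
          · rw [if_pos hse, if_pos hse, pvLabel]
            exact ih (i+1) _ [] _ ctag inside false tag "" (by omega) (by rw [hwb']; rfl) h2
              (by simp)
          · rw [if_neg hse, if_neg hse]
            exact ih (i+1) _ _ _ ctag inside _ tag "" (by omega) (by rw [hwb']; rfl) h2 rfl
        · rw [if_neg hb2]
          have hcw : pvIsWord c = true := by
            unfold pvIsWord pvIsBound
            push_neg at hb2
            obtain ⟨hb1', hb2', hb3', hb4', hb5'⟩ := hb2
            simp [hb1', hb2', hb3', hb4', hb5', hc]
          rw [hdrop, pv_absorb c hcw]
          exact ih (i+1) (wb ++ [c]) cur sents ctag inside hb tag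
            (pend ++ String.ofList [c]) (by omega) (by simp [h1]) h2 h3

-- ===== VERDICT (by name: the statement is the Claim_ definition above) =====
theorem parse_annotated_text_spec : Claim_equal_parse_annotated_text := by
  intro s _hdom hpre
  show parse_annotated_text s = parse_annotated_text_alt s
  unfold parse_annotated_text parse_annotated_text_alt
  have hpre' : ∀ i, s.toList[i]? = some '<' → '>' ∈ s.toList.drop i := by
    intro i h
    by_cases hi : i < s.toList.length
    · exact hpre i hi h
    · rw [List.getElem?_eq_none (by omega)] at h; cases h
  have := pv_main s.toList hpre' s.toList.length 0 [] [] [] none false false "" ""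
    (by omega) (by simp) (by intro h; cases h) (by simp)
  simpa using this
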